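-- pv_equiv track=rewrite | github.com/vionion/advent-of-code-2019 | 2019/src/main.py | _has_double_and_only_double
-- ===== SOURCE A (Python) =====
-- def _has_double_and_only_double(digits):
--     previous_digit = digits[0]
--     group_size = 1
--     for digit in digits[1:]:
--         if previous_digit == digit:
--             group_size += 1
--         else:
--             if group_size == 2:
--                 return True
--             group_size = 1
--         previous_digit = digit
--     return group_size == 2
-- ===== SOURCE B (Python) =====
-- def _has_double_and_only_double(digits):
--     # A group of exactly two equal adjacent digits is a 4-window pattern on a
--     # sentinel-padded list: x starts a new value (x != w), pairs with y
--     # (x == y), and the pair ends there (y != z).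
--     b = object()
--     p = [b] + digits + [b]
--     return any(x != w and x == y and y != z
--                for w, x, y, z in zip(p, p[1:], p[2:], p[3:]))
-- ===== Notes on version B (the rewrite author's own statement) =====
-- stated objective: alternative
-- what changed: B detects a run of exactly two by a stateless 4-wide sliding-window pattern (x starts a new value, x pairs with y, the pair ends) over a sentinel-padded list via zip, instead of A's sequential run-length counter with early return; Pre_ excludes the empty list, on which A raises IndexError.
import Mathlib
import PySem

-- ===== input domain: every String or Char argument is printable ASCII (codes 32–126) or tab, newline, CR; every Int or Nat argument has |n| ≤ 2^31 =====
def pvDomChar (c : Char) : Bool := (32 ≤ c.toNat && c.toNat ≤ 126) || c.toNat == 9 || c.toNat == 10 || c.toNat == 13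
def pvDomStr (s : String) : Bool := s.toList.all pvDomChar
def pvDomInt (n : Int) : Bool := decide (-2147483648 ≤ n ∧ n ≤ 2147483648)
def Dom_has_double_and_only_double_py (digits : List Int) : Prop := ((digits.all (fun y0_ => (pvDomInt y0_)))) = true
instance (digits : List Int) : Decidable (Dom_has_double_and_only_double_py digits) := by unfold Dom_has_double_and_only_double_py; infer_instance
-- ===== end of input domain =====

-- B replaces A's sequential run-length counter by a stateless 4-wide sliding-window test
-- over a sentinel-padded list (alternative formulation, same cost); Pre_ excludes [],
-- on which A raises IndexError while B returns False.


-- ===== PORT A =====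
-- A's loop over digits[1:] with state (previous_digit, group_size); early return True on a closed run of size 2.
def pvALoop (prev : Int) (gs : Int) : List Int → Bool
  | [] => gs == 2
  | d :: ds =>
    if prev == d then pvALoop d (gs + 1) ds
    else if gs == 2 then true else pvALoop d 1 ds

-- A raises IndexError on the empty list when reading digits[0]; Pre_ excludes that input (port value there is unused).
def has_double_and_only_double_py (digits : List Int) : Bool :=
  match digits with
  | [] => false
  | d0 :: rest => pvALoop d0 1 rest

-- ===== PORT B =====
-- the window predicate of Source B's generator: x != w and x == y and y != z;
-- the unique sentinel object b is ported as `none`, real digits as `some`.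
def pvPred (w x y z : Option Int) : Bool := (x != w) && (x == y) && (y != z)

def has_double_and_only_double_py_alt (digits : List Int) : Bool :=
  let p : List (Option Int) := [none] ++ digits.map some ++ [none]
  (p.zip ((p.drop 1).zip ((p.drop 2).zip (p.drop 3)))).any
    (fun t => pvPred t.1 t.2.1 t.2.2.1 t.2.2.2)

-- ===== PRECONDITION & SPEC =====
-- Pre_ excludes exactly the empty list, on which A raises IndexError on its first-element access.
def Pre_has_double_and_only_double_py (digits : List Int) : Prop := digits ≠ []
instance (digits : List Int) : Decidable (Pre_has_double_and_only_double_py digits) := by unfold Pre_has_double_and_only_double_py; infer_instance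
def pvWitness_has_double_and_only_double_py : List Int := [1, 1, 2]

def Spec_has_double_and_only_double_py (digits : List Int) (out : Bool) : Prop := out = has_double_and_only_double_py_alt digits
instance (digits : List Int) (out : Bool) : Decidable (Spec_has_double_and_only_double_py digits out) := by unfold Spec_has_double_and_only_double_py; infer_instance

-- ===== CLAIM (what is proved, stated in full; the proofs are below) =====
def Claim_equal_has_double_and_only_double_py : Prop := ∀ (digits : List Int), Dom_has_double_and_only_double_py digits → Pre_has_double_and_only_double_py digits → Spec_has_double_and_only_double_py digits (has_double_and_only_double_py digits)

-- ===== LEMMAS AND PROOFS =====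
-- Proof-side bridge: both ports are shown equal to a run-splitting evaluator pvBLoop.
def pvRun (v : Int) : List Int → Nat × List Int
  | [] => (0, [])
  | y :: ys => if y == v then
      let p := pvRun v ys
      (p.1 + 1, p.2)
    else (0, y :: ys)

theorem pvRun_len_le (v : Int) (l : List Int) : (pvRun v l).2.length ≤ l.length := by
  induction l with
  | nil => simp [pvRun]
  | cons y ys ih =>
    simp only [pvRun]
    split
    · exact Nat.le_succ_of_le ih
    · simp

def pvBLoop : List Int → Bool
  | [] => false
  | x :: xs =>
    let p := pvRun x xs
    if p.1 + 1 = 2 then true else pvBLoop p.2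
  termination_by l => l.length
  decreasing_by
    exact Nat.lt_succ_of_le (pvRun_len_le x xs)

theorem pvRun_split (v : Int) (l : List Int) :
    l = List.replicate (pvRun v l).1 v ++ (pvRun v l).2 := by
  induction l with
  | nil => simp [pvRun]
  | cons y ys ih =>
    by_cases h : y = v
    · subst h
      simp only [pvRun, BEq.rfl, if_true, List.replicate_succ, List.cons_append]
      exact congrArg (y :: ·) ih
    · simp [pvRun, h]

theorem pvRun_head (v : Int) (l : List Int) :
    ∀ y, (pvRun v l).2.head? = some y → y ≠ v := by
  induction l with
  | nil => simp [pvRun]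
  | cons z zs ih =>
    by_cases h : z = v
    · subst h; simpa [pvRun] using ih
    · intro y hy
      simp [pvRun, h, List.head?] at hy
      subst hy; exact h

-- A = pvBLoop
theorem pvALoop_eq (xs : List Int) : ∀ (v g : Int),
    pvALoop v g xs = (if g + ((pvRun v xs).1 : Int) = 2 then true else pvBLoop (pvRun v xs).2) := by
  induction xs with
  | nil => intro v g; simp only [pvALoop, pvRun, Nat.cast_zero, add_zero]; rw [pvBLoop]; by_cases hg : g = 2 <;> simp [hg]
  | cons y ys ih =>
    intro v g
    by_cases h : y = v
    · subst h
      have e1 : pvALoop y g (y :: ys) = pvALoop y (g + 1) ys := by simp [pvALoop]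
      have e2 : pvRun y (y :: ys) = ((pvRun y ys).1 + 1, (pvRun y ys).2) := by simp [pvRun]
      rw [e1, ih y (g + 1), e2]
      congr 1
      simp only [eq_iff_iff]
      push_cast
      constructor <;> intro <;> omega
    · have hvy : (v == y) = false := by
        simp only [beq_eq_false_iff_ne, ne_eq]
        intro e; exact h e.symm
      have e1 : pvALoop v g (y :: ys) = (if g == 2 then true else pvALoop y 1 ys) := by
        simp only [pvALoop, hvy, Bool.false_eq_true, if_false]
      have e2 : pvRun v (y :: ys) = (0, y :: ys) := by simp [pvRun, h]
      rw [e1, ih y 1, e2]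
      rw [show pvBLoop (y :: ys) = (if (pvRun y ys).1 + 1 = 2 then true else pvBLoop (pvRun y ys).2) from by rw [pvBLoop]]
      simp only [beq_iff_eq, Nat.cast_zero, add_zero]
      congr 2
      simp only [eq_iff_iff]
      constructor <;> intro <;> omega

-- window-any as a structural recursion
def pvWAny3 (a b c : Option Int) : List (Option Int) → Bool
  | [] => false
  | d :: rest => pvPred a b c d || pvWAny3 b c d rest

def pvWAny : List (Option Int) → Bool
  | a :: b :: c :: rest => pvWAny3 a b c rest
  | _ => false

theorem pvWAny_cons4 (a b c d : Option Int) (rest : List (Option Int)) :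
    pvWAny (a :: b :: c :: d :: rest) = (pvPred a b c d || pvWAny (b :: c :: d :: rest)) := rfl

theorem pvZip_eq_wAny (l : List (Option Int)) :
    (l.zip ((l.drop 1).zip ((l.drop 2).zip (l.drop 3)))).any
      (fun t => pvPred t.1 t.2.1 t.2.2.1 t.2.2.2) = pvWAny l := by
  match l with
  | [] => rfl
  | [_] => rfl
  | [_, _] => rfl
  | [_, _, _] => rfl
  | a :: b :: c :: d :: r =>
    have ih := pvZip_eq_wAny (b :: c :: d :: r)
    rw [pvWAny_cons4]
    simp only [List.drop, List.zip_cons_cons, List.any_cons] at *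
    rw [ih]
  termination_by l.length

theorem wAny_dup (a : Option Int) (rest : List (Option Int)) :
    pvWAny (a :: a :: rest) = pvWAny (a :: rest) := by
  match rest with
  | [] => rfl
  | [_] => rfl
  | c :: d :: rs =>
    rw [pvWAny_cons4]
    simp [pvPred]

theorem wAny_interior (v : Option Int) (m : Nat) (tail : List (Option Int)) :
    pvWAny (v :: List.replicate m v ++ tail) = pvWAny (v :: tail) := by
  induction m with
  | zero => rfl
  | succ k ih =>
    rw [List.replicate_succ, List.cons_append]
    exact (wAny_dup v (List.replicate k v ++ tail)).trans ih

theorem wAny_run (w : Option Int) (v : Int) (m : Nat) (tail : List (Option Int))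
    (hw : w ≠ some v) (hm : 1 ≤ m) (hne : tail ≠ [])
    (ht : ∀ y, tail.head? = some y → y ≠ some v) :
    pvWAny (w :: List.replicate m (some v) ++ tail) =
      (decide (m = 2) || pvWAny (some v :: tail)) := by
  match m, tail with
  | 0, _ => omega
  | 1, [] => exact absurd rfl hne
  | 1, [t1] =>
    simp [List.replicate, pvWAny, pvWAny3]
  | 1, t1 :: t2 :: ts =>
    have h1 : ¬ some v = t1 := fun h => ht t1 rfl h.symm
    simp only [List.replicate, List.cons_append, List.nil_append, pvWAny_cons4]
    simp [pvPred, h1]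
  | 2, t1 :: ts =>
    have h1 : ¬ some v = t1 := fun h => ht t1 rfl h.symm
    have hw' : ¬ some v = w := fun h => hw h.symm
    simp only [List.replicate, List.cons_append, List.nil_append, pvWAny_cons4]
    have hp : pvPred w (some v) (some v) t1 = true := by
      simp [pvPred, hw', h1]
    simp [hp]
  | (k + 3), tail =>
    simp only [List.replicate_succ, List.cons_append, pvWAny_cons4]
    have hp : pvPred w (some v) (some v) (some v) = false := by simp [pvPred]
    rw [hp, Bool.false_or]
    have hin : pvWAny (some v :: some v :: some v :: (List.replicate k (some v) ++ tail))
        = pvWAny (some v :: tail) := by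
      have := wAny_interior (some v) (k + 2) tail
      simpa [List.replicate_succ] using this
    rw [hin]
    simp

theorem wAny_eq_bloop (l : List Int) : ∀ (w : Option Int),
    (∀ x, l.head? = some x → w ≠ some x) →
    pvWAny (w :: l.map some ++ [none]) = pvBLoop l := by
  match l with
  | [] => intro w _; simp [pvWAny, pvBLoop]
  | x :: xs =>
    intro w hw
    have hsplit := pvRun_split x xs
    have hmap : w :: (x :: xs).map some ++ [none]
        = w :: (List.replicate ((pvRun x xs).1 + 1) (some x)
          ++ ((pvRun x xs).2.map some ++ [none])) := by
      conv_lhs => rw [hsplit]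
      simp [List.replicate_succ]
    rw [hmap]
    have hne : (pvRun x xs).2.map some ++ [none] ≠ [] := by simp
    have ht : ∀ y, ((pvRun x xs).2.map some ++ [none]).head? = some y → y ≠ some x := by
      intro y hy
      match hrest : (pvRun x xs).2 with
      | [] => rw [hrest] at hy; simp at hy; simp [← hy]
      | r :: rs =>
        rw [hrest] at hy
        simp at hy
        have hr := pvRun_head x xs r (by rw [hrest]; rfl)
        rw [← hy]
        intro h
        exact hr (Option.some.inj h)
    rw [show w :: (List.replicate ((pvRun x xs).1 + 1) (some x)
          ++ ((pvRun x xs).2.map some ++ [none]))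
        = w :: List.replicate ((pvRun x xs).1 + 1) (some x)
          ++ ((pvRun x xs).2.map some ++ [none]) from rfl]
    rw [wAny_run w x ((pvRun x xs).1 + 1) _ (hw x rfl) (by omega) hne ht]
    have ih : pvWAny (some x :: (List.map some (pvRun x xs).2 ++ [none]))
        = pvBLoop (pvRun x xs).2 := wAny_eq_bloop (pvRun x xs).2 (some x)
      (by intro y hy h
          exact pvRun_head x xs y hy (Option.some.inj h).symm)
    rw [ih]
    rw [show pvBLoop (x :: xs) = (if (pvRun x xs).1 + 1 = 2 then true else pvBLoop (pvRun x xs).2) from by rw [pvBLoop]]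
    by_cases h2 : (pvRun x xs).1 + 1 = 2 <;> simp [h2]
  termination_by l.length
  decreasing_by
    exact Nat.lt_succ_of_le (pvRun_len_le x xs)

theorem alt_eq_bloop (digits : List Int) :
    has_double_and_only_double_py_alt digits = pvBLoop digits := by
  unfold has_double_and_only_double_py_alt
  rw [pvZip_eq_wAny]
  exact wAny_eq_bloop digits none (by intro x _; simp)

-- ===== VERDICT (by name: the statement is the Claim_ definition above) =====
theorem has_double_and_only_double_py_spec : Claim_equal_has_double_and_only_double_py := by
  intro digits _ hpre
  unfold Spec_has_double_and_only_double_py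
  rw [alt_eq_bloop]
  unfold has_double_and_only_double_py
  match digits with
  | [] => exact absurd rfl hpre
  | d0 :: rest =>
    show pvALoop d0 1 rest = pvBLoop (d0 :: rest)
    rw [pvALoop_eq rest d0 1]
    rw [show pvBLoop (d0 :: rest) = (if (pvRun d0 rest).1 + 1 = 2 then true else pvBLoop (pvRun d0 rest).2) from by rw [pvBLoop]]
    congr 1
    simp only [eq_iff_iff]
    constructor <;> intro <;> omega
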